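-- pv_equiv track=rewrite | github.com/rolroralra/algorithm_python | problems/string/1316.py | check
-- ===== SOURCE A (Python) =====
-- def check(value):
--     isChecked = set()
--
--     prev = ""
--     for curr in value:
--         if curr != prev:
--             if curr in isChecked:
--                 return False
--
--             isChecked.add(curr)
--             prev = curr
--
--     return True
-- ===== SOURCE B (Python) =====
-- def check(value):
--     last = {c: i for i, c in enumerate(value)}
--     return all(last[c] == i or value[i + 1] == c for i, c in enumerate(value))
-- ===== Notes on version B (the rewrite author's own statement) =====
-- stated objective: idiomatic
-- what changed: Replaces A's interleaved scan (seen-set + prev-char sentinel + early return) with a two-phase last-occurrence-index computation: a dict comprehension maps each char to its last index, then all() checks that every position either is its char's last occurrence or is immediately followed by the same char.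
import Mathlib
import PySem

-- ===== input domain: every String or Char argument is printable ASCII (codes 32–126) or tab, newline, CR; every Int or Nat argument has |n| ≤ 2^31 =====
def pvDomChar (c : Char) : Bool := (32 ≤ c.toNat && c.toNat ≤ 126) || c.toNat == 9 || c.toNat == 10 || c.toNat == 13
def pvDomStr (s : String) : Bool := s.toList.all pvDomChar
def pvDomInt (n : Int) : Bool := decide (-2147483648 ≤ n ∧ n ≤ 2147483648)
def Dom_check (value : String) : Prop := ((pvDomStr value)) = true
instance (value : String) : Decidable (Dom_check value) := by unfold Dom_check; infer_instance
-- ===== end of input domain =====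

-- B replaces A's interleaved scan (seen-set + prev sentinel + early return) by a two-phase
-- last-occurrence check: build {char → last index}, then all() over positions (same cost, idiomatic).

-- ===== PORT A =====
-- A's loop: seen-set, prev sentinel ('prev = ""' ported as 'none': a Char of a string never equals ""),
-- early return False on a repeated run key.
def checkLoop : List Char → PySem.Set Char → Option Char → Bool
  | [], _, _ => true
  | curr :: rest, isChecked, prev =>
    if some curr ≠ prev then
      if PySem.Set.contains isChecked curr then false
      else checkLoop rest (PySem.Set.add isChecked curr) (some curr)
    else checkLoop rest isChecked prev

def check (value : String) : Bool := checkLoop value.toList PySem.Set.empty none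

-- ===== PORT B =====
-- B: last = {c: i for i, c in enumerate(value)}; then
--    all(last[c] == i or value[i + 1] == c for i, c in enumerate(value)).
-- 'last[c]' is ported as 'get? == some i' (the key is always present, so no KeyError);
-- 'value[i + 1]' as pyGet? (only evaluated when i is not c's last index, hence always in range).
def check_alt (value : String) : Bool :=
  let l := value.toList
  let last : PySem.Dict Char Int :=
    (PySem.List.enumerate l).foldl (fun d p => d.insert p.2 p.1) PySem.Dict.empty
  (PySem.List.enumerate l).all (fun p =>
    (last.get? p.2 == some p.1) || (PySem.List.pyGet? l (p.1 + 1) == some p.2))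

-- ===== PRECONDITION & SPEC =====
def Spec_check (value : String) (out : Bool) : Prop := out = check_alt value
instance (value : String) (out : Bool) : Decidable (Spec_check value out) := by unfold Spec_check; infer_instance

-- ===== CLAIM (what is proved, stated in full; the proofs are below) =====
def Claim_equal_check : Prop := ∀ (value : String), Dom_check value → Spec_check value (check value)

-- ===== LEMMAS AND PROOFS =====

-- The common characterisation both programs are proved equal to:
-- no char reappears after a different char (no subsequence [c, d, c] with c ≠ d).
def NB (l : List Char) : Prop := ∀ c d : Char, c ≠ d → ¬ ([c, d, c].Sublist l)

lemma contains_true (s : PySem.Set Char) (x : Char) (h : x ∈ s) : PySem.Set.contains s x = true :=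
  (PySem.Set.contains_iff s x).mpr h
lemma contains_false (s : PySem.Set Char) (x : Char) (h : x ∉ s) : PySem.Set.contains s x = false := by
  rw [← Bool.not_eq_true]; exact fun hh => h ((PySem.Set.contains_iff s x).mp hh)

lemma loop_false_of_seen (l : List Char) (s : PySem.Set Char) (prev : Option Char) (c : Char)
    (hc : c ∈ s) (hcl : c ∈ l) (hne : prev ≠ some c) : checkLoop l s prev = false := by
  induction l generalizing s prev with
  | nil => simp at hcl
  | cons x t ih =>
    simp only [checkLoop]
    by_cases hxp : some x = prev
    · rw [if_neg (by simp [hxp])]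
      have hxc : x ≠ c := fun h => hne (h ▸ hxp.symm)
      exact ih s prev hc (by simpa [hxc.symm] using hcl) hne
    · rw [if_pos hxp]
      by_cases hm : x ∈ s
      · rw [contains_true s x hm]; simp
      · rw [contains_false s x hm]
        simp only [Bool.false_eq_true, if_false]
        have hxc : x ≠ c := fun h => hm (h ▸ hc)
        exact ih _ (some x) ((PySem.Set.mem_add _ _ _).mpr (Or.inl hc))
          (by simpa [hxc.symm] using hcl) (by simp [hxc])

lemma loop_false_of_seen_prev (l : List Char) (s : PySem.Set Char) (c d : Char)
    (hc : c ∈ s) (hd : d ≠ c) (hsub : [d, c].Sublist l) : checkLoop l s (some c) = false := by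
  induction l generalizing s with
  | nil => simp at hsub
  | cons x t ih =>
    simp only [checkLoop]
    by_cases hxc : x = c
    · rw [if_neg (by simp [hxc])]
      refine ih s hc ?_
      cases hsub with
      | cons _ h => exact h
      | cons₂ _ h => exact absurd hxc (by rintro rfl; exact hd rfl)
    · rw [if_pos (by simp [hxc])]
      by_cases hm : x ∈ s
      · rw [contains_true s x hm]; simp
      · rw [contains_false s x hm]
        simp only [Bool.false_eq_true, if_false]
        have hct : c ∈ t := by
          have : c ∈ x :: t := hsub.subset (by simp)
          simpa [Ne.symm hxc] using this
        exact loop_false_of_seen t _ (some x) c ((PySem.Set.mem_add _ _ _).mpr (Or.inl hc)) hct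
          (by simp [hxc])

lemma loop_false_of_bad (l : List Char) (s : PySem.Set Char) (prev : Option Char)
    (hps : ∀ p, prev = some p → p ∈ s) (c d : Char) (hcd : c ≠ d)
    (hsub : [c, d, c].Sublist l) : checkLoop l s prev = false := by
  induction l generalizing s prev with
  | nil => simp at hsub
  | cons x t ih =>
    have hcase : ([c, d, c].Sublist t) ∨ (x = c ∧ [d, c].Sublist t) := by
      cases hsub with
      | cons _ h => exact Or.inl h
      | cons₂ _ h => exact Or.inr ⟨rfl, h⟩
    simp only [checkLoop]
    by_cases hxp : some x = prev
    · rw [if_neg (by simp [hxp])]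
      rcases hcase with h | ⟨hxc, h⟩
      · exact ih s prev hps h
      · subst hxc
        rw [← hxp]
        exact loop_false_of_seen_prev t s _ d (hps _ hxp.symm) hcd.symm h
    · rw [if_pos hxp]
      by_cases hm : x ∈ s
      · rw [contains_true s x hm]; simp
      · rw [contains_false s x hm]
        simp only [Bool.false_eq_true, if_false]
        rcases hcase with h | ⟨hxc, h⟩
        · refine ih _ (some x) ?_ h
          intro p hp
          injection hp with hp'
          subst hp'
          exact (PySem.Set.mem_add _ _ _).mpr (Or.inr rfl)
        · subst hxc
          exact loop_false_of_seen_prev t _ _ d ((PySem.Set.mem_add _ _ _).mpr (Or.inr rfl)) hcd.symm h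

lemma mem_dropWhile_bad (t : List Char) (x : Char) (hx : x ∈ t.dropWhile (· == x)) :
    ∃ d, d ≠ x ∧ [d, x].Sublist t := by
  induction t with
  | nil => simp at hx
  | cons y r ih =>
    by_cases hyx : y = x
    · rw [List.dropWhile_cons_of_pos (by simp [hyx])] at hx
      obtain ⟨d, hd, hs⟩ := ih hx
      exact ⟨d, hd, hs.cons y⟩
    · rw [List.dropWhile_cons_of_neg (by simp [hyx])] at hx
      have hxr : x ∈ r := by
        rcases List.mem_cons.mp hx with h | h
        · exact absurd h.symm hyx
        · exact h
      exact ⟨y, hyx, by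
        refine List.Sublist.cons₂ y ?_
        exact List.singleton_sublist.mpr hxr⟩

lemma loop_true (l : List Char) (s : PySem.Set Char) (prev : Option Char)
    (hNB : NB l) (hseen : ∀ c ∈ s, prev = some c ∨ c ∉ l)
    (hprev : ∀ p, prev = some p → p ∈ s ∧ p ∉ l.dropWhile (· == p)) :
    checkLoop l s prev = true := by
  induction l generalizing s prev with
  | nil => rfl
  | cons x t ih =>
    have hNBt : NB t := fun c d hcd hs => hNB c d hcd (hs.cons x)
    simp only [checkLoop]
    by_cases hxp : some x = prev
    · rw [if_neg (by simp [hxp])]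
      refine ih s prev hNBt ?_ ?_
      · intro c hc
        rcases hseen c hc with h | h
        · exact Or.inl h
        · exact Or.inr (fun hm => h (List.mem_cons_of_mem x hm))
      · intro p hp
        obtain ⟨hps, hpd⟩ := hprev p hp
        refine ⟨hps, ?_⟩
        have hx : x = p := by injection (hxp.trans hp)
        rwa [List.dropWhile_cons_of_pos (by simp [hx])] at hpd
    · rw [if_pos hxp]
      have hxs : x ∉ s := by
        intro hm
        rcases hseen x hm with h | h
        · exact hxp h.symm
        · exact h (List.mem_cons_self)
      rw [contains_false s x hxs]
      simp only [Bool.false_eq_true, if_false]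
      refine ih (PySem.Set.add s x) (some x) hNBt ?_ ?_
      · intro c hc
        rcases (PySem.Set.mem_add _ _ _).mp hc with hc | hc
        · rcases hseen c hc with h | h
          · -- prev = some c: c ∉ dropWhile (==c) (x::t); x ≠ c, so c ∉ x::t, hence c ∉ t
            obtain ⟨_, hpd⟩ := hprev c h
            right
            intro hct
            have hxc : x ≠ c := fun he => hxp (he ▸ h).symm
            rw [List.dropWhile_cons_of_neg (by simp [hxc])] at hpd
            exact hpd (List.mem_cons_of_mem x hct)
          · exact Or.inr (fun hm => h (List.mem_cons_of_mem x hm))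
        · exact Or.inl (by rw [hc])
      · intro p hp
        have hp' : p = x := by injection hp with h; exact h.symm
        subst hp'
        refine ⟨(PySem.Set.mem_add _ _ _).mpr (Or.inr rfl), ?_⟩
        intro hmem
        obtain ⟨d, hd, hs2⟩ := mem_dropWhile_bad t p hmem
        exact hNB p d (Ne.symm hd) (List.Sublist.cons₂ p hs2)

lemma check_true_iff' (l : List Char) : checkLoop l PySem.Set.empty none = true ↔ NB l := by
  constructor
  · intro h c d hcd hsub
    have hf := loop_false_of_bad l PySem.Set.empty none (by intro p hp; cases hp) c d hcd hsub
    rw [hf] at h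
    cases h
  · intro h
    refine loop_true l PySem.Set.empty none h ?_ ?_
    · intro c hc
      cases hc
    · intro p hp
      cases hp

def idxLast : List Char → Char → Nat
  | [], _ => 0
  | _ :: t, c => if c ∈ t then idxLast t c + 1 else 0

lemma idxLast_get (l : List Char) (c : Char) (h : c ∈ l) : l[idxLast l c]? = some c := by
  induction l with
  | nil => cases h
  | cons x t ih =>
    by_cases hct : c ∈ t
    · simp only [idxLast, if_pos hct, List.getElem?_cons_succ]
      exact ih hct
    · have hxc : x = c := by
        rcases List.mem_cons.mp h with h' | h'
        · exact h'.symm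
        · exact absurd h' hct
      simp [idxLast, hct, hxc]

lemma idxLast_greatest (l : List Char) (c : Char) (j : Nat) (hj : idxLast l c < j) :
    l[j]? ≠ some c := by
  induction l generalizing j with
  | nil => simp
  | cons x t ih =>
    by_cases hct : c ∈ t
    · simp only [idxLast, if_pos hct] at hj
      match j, hj with
      | j + 1, hj =>
        rw [List.getElem?_cons_succ]
        exact ih (j := j) (by omega)
    · simp only [idxLast, if_neg hct] at hj
      match j, hj with
      | j + 1, _ =>
        rw [List.getElem?_cons_succ]
        intro hc
        exact hct (List.mem_of_getElem? hc)

lemma le_idxLast (l : List Char) (c : Char) (i : Nat) (hi : l[i]? = some c) :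
    i ≤ idxLast l c := by
  by_contra h
  exact idxLast_greatest l c i (by omega) hi

lemma idxLast_lt_length (l : List Char) (c : Char) (h : c ∈ l) : idxLast l c < l.length :=
  (List.getElem?_eq_some_iff.mp (idxLast_get l c h)).1

lemma build_get? (r : List Char) (k : Int) (d : PySem.Dict Char Int) (c : Char) :
    ((PySem.List.enumerate r k).foldl (fun d p => d.insert p.2 p.1) d).get? c
      = if c ∈ r then some (k + (idxLast r c : Int)) else d.get? c := by
  induction r generalizing k d with
  | nil => simp [PySem.List.enumerate_nil]
  | cons x t ih =>
    rw [PySem.List.enumerate_cons, List.foldl_cons, ih]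
    by_cases hct : c ∈ t
    · rw [if_pos hct, if_pos (List.mem_cons_of_mem x hct)]
      simp only [idxLast, if_pos hct]
      push_cast
      ring_nf
    · rw [if_neg hct]
      by_cases hxc : c = x
      · subst hxc
        rw [if_pos List.mem_cons_self]
        simp only [idxLast, if_neg hct]
        rw [PySem.Dict.get?_insert]
        simp
      · rw [if_neg (by simp [hxc, hct]), PySem.Dict.get?_insert, if_neg hxc]

def Pcond (l : List Char) (i : Nat) : Prop :=
  idxLast l (l.getD i default) = i ∨ l[i + 1]? = some (l.getD i default)

lemma check_alt_true_iff (value : String) :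
    check_alt value = true ↔ ∀ i < value.toList.length, Pcond value.toList i := by
  unfold check_alt
  simp only [List.all_eq_true]
  constructor
  · intro h i hi
    have hp := h (0 + i, value.toList[i]) (by
      rw [PySem.List.mem_enumerate_iff]
      exact ⟨i, hi, rfl⟩)
    simp only [Bool.or_eq_true, beq_iff_eq] at hp
    rw [build_get?] at hp
    rw [if_pos (List.getElem_mem hi)] at hp
    have hgd : value.toList.getD i default = value.toList[i] := List.getD_eq_getElem _ _ hi
    rcases hp with hp | hp
    · left
      rw [hgd]
      injection hp with hp'
      omega
    · right
      rw [hgd]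
      rw [show (0 : Int) + i + 1 = ((i + 1 : Nat) : Int) by push_cast; ring] at hp
      rwa [PySem.List.pyGet?_natCast] at hp
  · intro h p hp
    rw [PySem.List.mem_enumerate_iff] at hp
    obtain ⟨i, hi, rfl⟩ := hp
    simp only [Bool.or_eq_true, beq_iff_eq]
    rw [build_get?, if_pos (List.getElem_mem hi)]
    have hgd : value.toList.getD i default = value.toList[i] := List.getD_eq_getElem _ _ hi
    rcases h i hi with hc | hc
    · left
      rw [hgd] at hc
      rw [hc]
    · right
      rw [hgd] at hc
      rw [show (0 : Int) + i + 1 = ((i + 1 : Nat) : Int) by push_cast; ring, PySem.List.pyGet?_natCast]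
      exact hc
lemma sub1 (l : List Char) (k : Nat) (e : Char) (he : l[k]? = some e) : [e].Sublist l := by
  rw [List.singleton_sublist]
  exact List.mem_of_getElem? he
lemma sub2 (l : List Char) (j k : Nat) (hjk : j < k)
    (b e : Char) (hb : l[j]? = some b) (he : l[k]? = some e) : [b, e].Sublist l := by
  have hj : j < l.length := (List.getElem?_eq_some_iff.mp hb).1
  have hd : l.drop j = b :: l.drop (j + 1) := by
    rw [List.drop_eq_getElem_cons hj]
    congr 1
    exact (List.getElem?_eq_some_iff.mp hb).2.symm ▸ rfl
  refine List.Sublist.trans ?_ (List.drop_sublist j l)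
  rw [hd]
  refine List.Sublist.cons₂ _ ?_
  refine sub1 _ (k - (j+1)) _ ?_
  rw [List.getElem?_drop]
  rw [show j + 1 + (k - (j+1)) = k by omega]
  exact he
lemma sub3 (l : List Char) (i j k : Nat) (hij : i < j) (hjk : j < k)
    (a b e : Char) (ha : l[i]? = some a) (hb : l[j]? = some b) (he : l[k]? = some e) :
    [a, b, e].Sublist l := by
  have hi : i < l.length := (List.getElem?_eq_some_iff.mp ha).1
  have hd : l.drop i = a :: l.drop (i + 1) := by
    rw [List.drop_eq_getElem_cons hi]
    congr 1
    exact (List.getElem?_eq_some_iff.mp ha).2.symm ▸ rfl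
  refine List.Sublist.trans ?_ (List.drop_sublist i l)
  rw [hd]
  refine List.Sublist.cons₂ _ ?_
  refine sub2 _ (j - (i+1)) (k - (i+1)) (by omega) _ _ ?_ ?_ <;>
    rw [List.getElem?_drop]
  · rw [show i + 1 + (j - (i+1)) = j by omega]; exact hb
  · rw [show i + 1 + (k - (i+1)) = k by omega]; exact he
lemma ex3 (l : List Char) (a b e : Char) (h : [a, b, e].Sublist l) :
    ∃ i j k : Nat, i < j ∧ j < k ∧ l[i]? = some a ∧ l[j]? = some b ∧ l[k]? = some e := by
  obtain ⟨f, hf⟩ := List.sublist_iff_exists_fin_orderEmbedding_get_eq.mp h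
  have h01 : (⟨0, by norm_num⟩ : Fin 3) < ⟨1, by norm_num⟩ := by
    rw [Fin.mk_lt_mk]; norm_num
  have h12 : (⟨1, by norm_num⟩ : Fin 3) < ⟨2, by norm_num⟩ := by
    rw [Fin.mk_lt_mk]; norm_num
  refine ⟨f ⟨0, by norm_num⟩, f ⟨1, by norm_num⟩, f ⟨2, by norm_num⟩,
    f.lt_iff_lt.mpr h01, f.lt_iff_lt.mpr h12, ?_, ?_, ?_⟩
  · rw [List.getElem?_eq_getElem (f _).isLt]
    exact congrArg some (hf ⟨0, by norm_num⟩).symm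
  · rw [List.getElem?_eq_getElem (f _).isLt]
    exact congrArg some (hf ⟨1, by norm_num⟩).symm
  · rw [List.getElem?_eq_getElem (f _).isLt]
    exact congrArg some (hf ⟨2, by norm_num⟩).symm

lemma NB_iff_Pcond (l : List Char) : NB l ↔ ∀ i < l.length, Pcond l i := by
  constructor
  · intro hNB i hi
    have hgd : l.getD i default = l[i] := List.getD_eq_getElem _ _ hi
    set c := l[i] with hc
    have hig : l[i]? = some c := List.getElem?_eq_getElem hi
    have him : i ≤ idxLast l c := le_idxLast l c i hig
    unfold Pcond
    rw [hgd]
    by_cases heq : idxLast l c = i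
    · exact Or.inl heq
    · have hilt : i < idxLast l c := by omega
      have hmm : l[idxLast l c]? = some c := idxLast_get l c (List.getElem_mem hi)
      have hmlen : idxLast l c < l.length := idxLast_lt_length l c (List.getElem_mem hi)
      have hi1 : i + 1 < l.length := by omega
      right
      have hdg : l[i+1]? = some l[i+1] := List.getElem?_eq_getElem hi1
      by_cases hdc : l[i+1] = c
      · rw [hdg, hdc]
      · exfalso
        have h1m : i + 1 < idxLast l c := by
          rcases Nat.lt_or_ge (i+1) (idxLast l c) with h | h
          · exact h
          · have : i + 1 = idxLast l c := by omega
            rw [← this] at hmm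
            rw [hdg] at hmm
            exact absurd (Option.some.inj hmm) hdc
        exact hNB c l[i+1] (Ne.symm hdc) (sub3 l i (i+1) (idxLast l c) (by omega) h1m
          c l[i+1] c hig hdg hmm)
  · intro h c d hcd hsub
    obtain ⟨i, j, k, hij, hjk, ha, hb, hk2⟩ := ex3 l c d c hsub
    obtain ⟨i0, hP0, hi0le, hgr⟩ :
        ∃ i0, l[i0]? = some c ∧ i0 ≤ j - 1 ∧ ∀ t, i0 < t → t ≤ j - 1 → ¬(l[t]? = some c) :=
      ⟨Nat.findGreatest (fun t => l[t]? = some c) (j - 1),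
        Nat.findGreatest_spec (P := fun t => l[t]? = some c) (m := i) (n := j - 1) (by omega) ha,
        Nat.findGreatest_le _,
        fun t ht1 ht2 => Nat.findGreatest_is_greatest (P := fun t => l[t]? = some c) ht1 ht2⟩
    have hi0n : i0 < l.length := (List.getElem?_eq_some_iff.mp hP0).1
    have hgd : l.getD i0 default = c := by
      rw [List.getD_eq_getElem _ _ hi0n]
      exact Option.some.inj ((List.getElem?_eq_getElem hi0n).symm.trans hP0)
    have hkn : k ≤ idxLast l c := le_idxLast l c k hk2
    have hP := h i0 hi0n
    unfold Pcond at hP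
    rcases hP with hcase | hcase
    · rw [hgd] at hcase
      omega
    · rw [hgd] at hcase
      by_cases hj : i0 + 1 = j
      · rw [hj, hb] at hcase
        exact hcd (Option.some.inj hcase).symm
      · exact hgr (i0 + 1) (by omega) (by omega) hcase

lemma check_true_iff (value : String) : check value = true ↔ NB value.toList :=
  check_true_iff' value.toList

-- ===== VERDICT (by name: the statement is the Claim_ definition above) =====
theorem check_spec : Claim_equal_check := by
  intro value _
  unfold Spec_check
  rw [Bool.eq_iff_iff, check_true_iff, check_alt_true_iff]
  exact NB_iff_Pcond value.toList
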